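-- pv_equiv track=rewrite | github.com/thiagofernandes1987-create/APEX | algorithms/uco-sensor/sensor-api/lang_adapters/generic.py | _halstead_metrics
-- ===== SOURCE A (Python) =====
-- from typing import Dict, List, Optional, Set, Tuple
--
-- def _halstead_metrics(
--     tokens: List[str], operator_set: Set[str]
-- ) -> Tuple[int, int, int, int]:
--     """
--     Halstead token partitioning.
--
--     Returns (n1, n2, N1, N2):
--       n1 = distinct operators
--       n2 = distinct operands
--       N1 = total  operators
--       N2 = total  operands
--     """
--     ops: Dict[str, int]  = {}
--     opds: Dict[str, int] = {}
--     for tok in tokens: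
--         if tok in operator_set:
--             ops[tok]  = ops.get(tok, 0)  + 1
--         else:
--             opds[tok] = opds.get(tok, 0) + 1
--     return len(ops), len(opds), sum(ops.values()), sum(opds.values())
-- ===== SOURCE B (Python) =====
-- from typing import Dict, List, Set, Tuple
--
-- def _halstead_metrics(
--     tokens: List[str], operator_set: Set[str]
-- ) -> Tuple[int, int, int, int]:
--     # Build one frequency table over all tokens, then partition its
--     # distinct keys into operators/operands in a second pass.
--     counts: Dict[str, int] = {}
--     for tok in tokens:
--         counts[tok] = counts.get(tok, 0) + 1
--     n1 = n2 = N1 = N2 = 0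
--     for tok, c in counts.items():
--         if tok in operator_set:
--             n1 += 1
--             N1 += c
--         else:
--             n2 += 1
--             N2 += c
--     return n1, n2, N1, N2
-- ===== Notes on version B (the rewrite author's own statement) =====
-- stated objective: idiomatic
-- what changed: A branches per token into two separate count dicts; B builds one frequency table over all tokens and then classifies each distinct token in a second pass over the table's items.
import Mathlib
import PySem

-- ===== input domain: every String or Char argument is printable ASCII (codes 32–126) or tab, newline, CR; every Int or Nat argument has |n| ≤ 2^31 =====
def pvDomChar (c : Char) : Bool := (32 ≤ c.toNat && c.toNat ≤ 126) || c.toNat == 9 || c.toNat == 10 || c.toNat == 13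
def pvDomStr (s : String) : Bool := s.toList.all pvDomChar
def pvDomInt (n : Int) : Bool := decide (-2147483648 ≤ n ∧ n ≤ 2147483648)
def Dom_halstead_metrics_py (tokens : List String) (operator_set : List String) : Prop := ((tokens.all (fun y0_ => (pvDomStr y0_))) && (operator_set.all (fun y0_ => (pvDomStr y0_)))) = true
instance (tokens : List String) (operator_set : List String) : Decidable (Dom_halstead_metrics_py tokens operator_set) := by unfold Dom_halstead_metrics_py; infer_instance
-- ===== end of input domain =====

-- B replaces A's per-token branching into two count dicts by a single frequency
-- table built over all tokens followed by a classifying pass over its distinct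
-- items (objective: more idiomatic decomposition; same O(n) cost).

-- ===== PORT A =====
-- two dicts, per-token branch: ops[tok] = ops.get(tok,0)+1 / opds likewise
def halstead_metrics_py (tokens : List String) (operator_set : List String) : Int × Int × Int × Int :=
  let st := tokens.foldl
    (fun (st : PySem.Dict String Int × PySem.Dict String Int) tok =>
      if tok ∈ operator_set then
        (st.1.insert tok (st.1.getD tok 0 + 1), st.2)
      else
        (st.1, st.2.insert tok (st.2.getD tok 0 + 1)))
    (PySem.Dict.empty, PySem.Dict.empty)
  ((st.1.size : Int), (st.2.size : Int), st.1.values.sum, st.2.values.sum)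

-- ===== PORT B =====
-- one frequency table, then a partitioning pass over its items
def halstead_metrics_py_alt (tokens : List String) (operator_set : List String) : Int × Int × Int × Int :=
  let counts := tokens.foldl (fun (d : PySem.Dict String Int) tok => d.insert tok (d.getD tok 0 + 1)) PySem.Dict.empty
  counts.items.foldl
    (fun (acc : Int × Int × Int × Int) p =>
      if p.1 ∈ operator_set then (acc.1 + 1, acc.2.1, acc.2.2.1 + p.2, acc.2.2.2)
      else (acc.1, acc.2.1 + 1, acc.2.2.1, acc.2.2.2 + p.2))
    (0, 0, 0, 0)

-- ===== PRECONDITION & SPEC =====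
def Spec_halstead_metrics_py (tokens : List String) (operator_set : List String) (out : Int × Int × Int × Int) : Prop := out = halstead_metrics_py_alt tokens operator_set
instance (tokens : List String) (operator_set : List String) (out : Int × Int × Int × Int) : Decidable (Spec_halstead_metrics_py tokens operator_set out) := by unfold Spec_halstead_metrics_py; infer_instance

-- ===== CLAIM (what is proved, stated in full; the proofs are below) =====
def Claim_equal_halstead_metrics_py : Prop := ∀ (tokens : List String) (operator_set : List String), Dom_halstead_metrics_py tokens operator_set → Spec_halstead_metrics_py tokens operator_set (halstead_metrics_py tokens operator_set)

-- ===== LEMMAS AND PROOFS =====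

-- A's single loop over two dicts equals two counting loops over the two filtered streams.
theorem pvA_split (operator_set : List String) (tokens : List String)
    (d1 d2 : PySem.Dict String Int) :
    tokens.foldl
      (fun (st : PySem.Dict String Int × PySem.Dict String Int) tok =>
        if tok ∈ operator_set then
          (st.1.insert tok (st.1.getD tok 0 + 1), st.2)
        else
          (st.1, st.2.insert tok (st.2.getD tok 0 + 1)))
      (d1, d2)
    = ((tokens.filter (fun t => decide (t ∈ operator_set))).foldl
         (fun (d : PySem.Dict String Int) tok => d.insert tok (d.getD tok 0 + 1)) d1,
       (tokens.filter (fun t => decide (¬ t ∈ operator_set))).foldl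
         (fun (d : PySem.Dict String Int) tok => d.insert tok (d.getD tok 0 + 1)) d2) := by
  induction tokens generalizing d1 d2 with
  | nil => rfl
  | cons a l ih =>
    by_cases h : a ∈ operator_set <;> simp [List.filter, h, ih]

-- ofList commutes with filter (first-occurrence dedup of a filtered stream).
theorem pvSet_add_filter {α : Type} [BEq α] [LawfulBEq α] (p : α → Bool) (s : List α) (x : α) :
    (PySem.Set.add s x).filter p = if p x then PySem.Set.add (s.filter p) x else s.filter p := by
  by_cases hx : p x <;>
    simp only [PySem.Set.add, hx, if_true] <;>
    by_cases hm : x ∈ s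
  · simp [hm, List.mem_filter, hx]
  · have : ¬ x ∈ s.filter p := by simp [List.mem_filter, hm]
    simp [hm, this, List.filter_append, hx]
  · simp [hm]
  · simp [hm, List.filter_append, hx]

theorem pvOfList_filter_foldl {α : Type} [BEq α] [LawfulBEq α] (p : α → Bool) (l : List α) :
    ∀ (s : List α),
      (l.filter p).foldl PySem.Set.add (s.filter p) = (l.foldl PySem.Set.add s).filter p := by
  induction l with
  | nil => intro s; rfl
  | cons a l ih =>
    intro s
    by_cases h : p a
    · simp only [List.filter, h, List.foldl_cons]
      rw [show PySem.Set.add (s.filter p) a = (PySem.Set.add s a).filter p by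
            rw [pvSet_add_filter p s a, if_pos h]]
      exact ih (PySem.Set.add s a)
    · simp only [List.filter, h, List.foldl_cons]
      rw [show s.filter p = (PySem.Set.add s a).filter p by
            rw [pvSet_add_filter p s a, if_neg h]]
      exact ih (PySem.Set.add s a)

theorem pvOfList_filter {α : Type} [BEq α] [LawfulBEq α] (p : α → Bool) (l : List α) :
    PySem.Set.ofList (l.filter p) = (PySem.Set.ofList l).filter p := by
  have := pvOfList_filter_foldl p l []
  simpa [PySem.Set.ofList_eq_foldl] using this

-- the distinct elements of l are a permutation of Mathlib's dedup
theorem pvOfList_perm_dedup {α : Type} [BEq α] [LawfulBEq α] [DecidableEq α] (l : List α) :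
    (PySem.Set.ofList l).Perm l.dedup := by
  apply (List.perm_ext_iff_of_nodup (PySem.Set.nodup_ofList l) l.nodup_dedup).mpr
  intro a
  simp [PySem.Set.mem_ofList, List.mem_dedup]

-- List.count does not depend on which lawful BEq instance is used
theorem pvCount_congr {α : Type} [BEq α] [LawfulBEq α] [DecidableEq α] (a : α) (l : List α) :
    l.count a = @List.count α instBEqOfDecidableEq a l := by
  induction l with
  | nil => rfl
  | cons b l ih =>
    rw [List.count_cons, @List.count_cons α instBEqOfDecidableEq, ih]
    by_cases h : b = a <;> simp [h]

-- summing each distinct element's multiplicity recovers the length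
theorem pvSum_counts {α : Type} [BEq α] [LawfulBEq α] [DecidableEq α] (l : List α) :
    ((PySem.Set.ofList l).map (fun k => (l.count k : Int))).sum = (l.length : Int) := by
  have hperm : ((PySem.Set.ofList l).map (fun k => (l.count k : Int))).Perm
      (l.dedup.map (fun k => (l.count k : Int))) := (pvOfList_perm_dedup l).map _
  rw [hperm.sum_eq]
  have h : (l.dedup.map (fun x => l.count x)).sum = l.length := by
    rw [List.map_congr_left (fun x _ => pvCount_congr x l)]
    exact List.sum_map_count_dedup_eq_length l
  have h2 : (((l.dedup.map (fun x => l.count x)).sum : Nat) : Int) = (l.length : Int) := by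
    exact_mod_cast h
  rw [Nat.cast_list_sum, List.map_map] at h2
  simpa [Function.comp_def] using h2

-- B's second pass, characterised on an arbitrary item list
theorem pvB_fold (operator_set : List String) (ps : List (String × Int))
    (a b c d : Int) :
    ps.foldl
      (fun (acc : Int × Int × Int × Int) p =>
        if p.1 ∈ operator_set then (acc.1 + 1, acc.2.1, acc.2.2.1 + p.2, acc.2.2.2)
        else (acc.1, acc.2.1 + 1, acc.2.2.1, acc.2.2.2 + p.2))
      (a, b, c, d)
    = (a + (ps.countP (fun p => decide (p.1 ∈ operator_set)) : Int),
       b + (ps.countP (fun p => decide (¬ p.1 ∈ operator_set)) : Int),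
       c + ((ps.filter (fun p => decide (p.1 ∈ operator_set))).map (·.2)).sum,
       d + ((ps.filter (fun p => decide (¬ p.1 ∈ operator_set))).map (·.2)).sum) := by
  induction ps generalizing a b c d with
  | nil => simp
  | cons x l ih =>
    by_cases h : x.1 ∈ operator_set <;>
      simp [List.filter, h, ih, Prod.ext_iff] <;> constructor <;> ring

-- A's per-stream counting dict, sized / summed (LHS of each component)
theorem pvSize (P : String → Bool) (l : List String) :
    (PySem.Dict.counter (l.filter P)).size = ((PySem.Set.ofList l).filter P).length := by
  simp [PySem.Dict.size, PySem.Dict.items_counter, pvOfList_filter]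

theorem pvValuesSum (P : String → Bool) (l : List String) :
    (PySem.Dict.counter (l.filter P)).values.sum = ((l.filter P).length : Int) := by
  have := pvSum_counts (l.filter P)
  simpa [PySem.Dict.values, PySem.Dict.items_counter, List.map_map, Function.comp] using this

-- B's per-class sum over the distinct tokens (RHS of the sum components)
theorem pvRHSsum (P : String → Bool) (l : List String) :
    (((PySem.Set.ofList l).filter P).map (fun k => (l.count k : Int))).sum
      = ((l.filter P).length : Int) := by
  rw [← pvOfList_filter]
  rw [List.map_congr_left (fun k hk => by
    have hP : P k = true := (List.mem_filter.mp ((PySem.Set.mem_ofList _ _).mp hk)).2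
    exact congrArg (fun n : Nat => (n : Int)) (List.count_filter hP).symm)]
  exact pvSum_counts _

-- ===== VERDICT (by name: the statement is the Claim_ definition above) =====
theorem halstead_metrics_py_spec : Claim_equal_halstead_metrics_py := by
  intro tokens operator_set _
  unfold Spec_halstead_metrics_py halstead_metrics_py halstead_metrics_py_alt
  dsimp only
  rw [pvA_split]
  rw [PySem.Dict.foldl_insert_getD_add_one_eq_counter,
      PySem.Dict.foldl_insert_getD_add_one_eq_counter,
      PySem.Dict.foldl_insert_getD_add_one_eq_counter]
  rw [PySem.Dict.items_counter, pvB_fold]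
  refine Prod.ext ?_ (Prod.ext ?_ (Prod.ext ?_ ?_))
  · simp [pvSize, List.filter_map, Function.comp_def, List.countP_eq_length_filter]
  · simp [pvSize, List.filter_map, Function.comp_def, List.countP_eq_length_filter]
  · simp only [List.filter_map, List.map_map, Function.comp_def, zero_add]
    rw [pvValuesSum, pvRHSsum]
  · simp only [List.filter_map, List.map_map, Function.comp_def, zero_add]
    rw [pvValuesSum, pvRHSsum]
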